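-- pv_equiv track=rewrite | github.com/ksongProjects/modeltrainer | src/quant_platform/pipeline/layered_models.py | _apply_fusion_feature_steps
-- ===== SOURCE A (Python) =====
-- from typing import Any, Callable
--
-- def _apply_fusion_feature_steps(feature_columns: list[str], config: dict[str, Any]) -> list[str]:
--     process_state = config.get("process_step_state") if isinstance(config.get("process_step_state"), dict) else {}
--     filtered = list(feature_columns)
--     exclusions = {
--         "include_price_signal": "price_signal_score",
--         "include_fundamental_signal": "fundamental_signal_score",
--         "include_sentiment_signal": "sentiment_signal_score",
--         "include_macro_signal": "macro_regime_score",
--     }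
--     for step_id, column_name in exclusions.items():
--         if not process_state.get(step_id, True):
--             filtered = [column for column in filtered if column != column_name]
--     return filtered
-- ===== SOURCE B (Python) =====
-- def _apply_fusion_feature_steps(feature_columns: list[str], config: dict) -> list[str]:
--     state = config.get("process_step_state")
--     if not isinstance(state, dict):
--         state = {}
--     # reverse mapping: signal column -> the flag that controls it
--     flag_for = {
--         "price_signal_score": "include_price_signal",
--         "fundamental_signal_score": "include_fundamental_signal",
--         "sentiment_signal_score": "include_sentiment_signal",
--         "macro_regime_score": "include_macro_signal",
--     }
--     def keep(column: str) -> bool: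
--         flag = flag_for.get(column)
--         return flag is None or bool(state.get(flag, True))
--     return [column for column in feature_columns if keep(column)]
-- ===== Notes on version B (the rewrite author's own statement) =====
-- stated objective: simpler
-- what changed: B decides each column directly with a reverse column-to-flag table (keep a column iff it is not a signal column or its flag is truthy) in one pass, instead of A's per-flag loop that rebuilds the filtered list once per disabled flag.
import Mathlib
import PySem

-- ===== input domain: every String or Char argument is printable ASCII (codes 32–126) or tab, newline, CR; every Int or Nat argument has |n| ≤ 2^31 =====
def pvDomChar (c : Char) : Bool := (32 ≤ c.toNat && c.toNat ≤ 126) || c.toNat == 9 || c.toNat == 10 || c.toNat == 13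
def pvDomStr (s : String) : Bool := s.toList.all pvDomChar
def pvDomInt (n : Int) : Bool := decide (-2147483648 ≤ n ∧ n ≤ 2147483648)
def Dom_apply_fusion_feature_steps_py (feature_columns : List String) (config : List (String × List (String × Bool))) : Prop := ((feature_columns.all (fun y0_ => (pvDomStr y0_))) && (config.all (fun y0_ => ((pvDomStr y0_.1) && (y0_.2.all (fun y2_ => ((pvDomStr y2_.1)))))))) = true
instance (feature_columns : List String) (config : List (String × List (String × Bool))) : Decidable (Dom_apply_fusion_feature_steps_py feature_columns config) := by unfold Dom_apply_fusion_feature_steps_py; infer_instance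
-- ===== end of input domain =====

-- B replaces A's per-flag loop (one rebuild of the filtered list per disabled flag) by a
-- reverse column→flag table and a single pass deciding each column directly. Objective: simpler.

-- ===== PORT A =====
-- the exclusions dict literal of A: flag -> column it controls
def pvExclusions : List (String × String) :=
  [("include_price_signal", "price_signal_score"),
   ("include_fundamental_signal", "fundamental_signal_score"),
   ("include_sentiment_signal", "sentiment_signal_score"),
   ("include_macro_signal", "macro_regime_score")]

def apply_fusion_feature_steps_py (feature_columns : List String) (config : List (String × List (String × Bool))) : List String :=
  -- process_state = config.get("process_step_state") if isinstance(...) else {}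
  -- (under the typed domain the value, when present, is always a dict)
  let process_state : PySem.Dict String Bool :=
    PySem.Dict.mk (((PySem.Dict.mk config).get? "process_step_state").getD [])
  -- for step_id, column_name in exclusions.items(): if not get(step_id, True): filtered = [...]
  pvExclusions.foldl
    (fun filtered sc =>
      if (process_state.getD sc.1 true) = false then
        filtered.filter (fun column => column != sc.2)
      else filtered)
    feature_columns

-- ===== PORT B =====
-- B's reverse dict literal: signal column -> the flag that controls it
def pvFlagFor : PySem.Dict String String :=
  PySem.Dict.mk
    [("price_signal_score", "include_price_signal"),
     ("fundamental_signal_score", "include_fundamental_signal"),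
     ("sentiment_signal_score", "include_sentiment_signal"),
     ("macro_regime_score", "include_macro_signal")]

-- keep(column): flag is None or state.get(flag, True)
def pvKeep (state : PySem.Dict String Bool) (column : String) : Bool :=
  match pvFlagFor.get? column with
  | none => true
  | some flag => state.getD flag true

def apply_fusion_feature_steps_py_alt (feature_columns : List String) (config : List (String × List (String × Bool))) : List String :=
  -- state = config.get("process_step_state"); if not isinstance(state, dict): state = {}
  let state : PySem.Dict String Bool :=
    match (PySem.Dict.mk config).get? "process_step_state" with
    | some d => PySem.Dict.mk d
    | none => PySem.Dict.empty
  feature_columns.filter (pvKeep state)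

-- ===== PRECONDITION & SPEC =====
def Spec_apply_fusion_feature_steps_py (feature_columns : List String) (config : List (String × List (String × Bool))) (out : List String) : Prop := out = apply_fusion_feature_steps_py_alt feature_columns config
instance (feature_columns : List String) (config : List (String × List (String × Bool))) (out : List String) : Decidable (Spec_apply_fusion_feature_steps_py feature_columns config out) := by unfold Spec_apply_fusion_feature_steps_py; infer_instance

-- ===== CLAIM (what is proved, stated in full; the proofs are below) =====
def Claim_equal_apply_fusion_feature_steps_py : Prop := ∀ (feature_columns : List String) (config : List (String × List (String × Bool))), Dom_apply_fusion_feature_steps_py feature_columns config → Spec_apply_fusion_feature_steps_py feature_columns config (apply_fusion_feature_steps_py feature_columns config)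

-- ===== LEMMAS AND PROOFS =====
-- A's per-flag filtering loop equals one filter keeping columns that survive every disabled flag.
lemma pv_loop_eq_filter (ps : PySem.Dict String Bool) :
    ∀ (ex : List (String × String)) (fc : List String),
      ex.foldl
        (fun filtered sc =>
          if (ps.getD sc.1 true) = false then
            filtered.filter (fun column => column != sc.2)
          else filtered)
        fc
      = fc.filter (fun column =>
          ex.all (fun sc => ps.getD sc.1 true || column != sc.2)) := by
  intro ex
  induction ex with
  | nil => intro fc; simp
  | cons p ex ih =>
      intro fc
      by_cases h : ps.getD p.1 true
      · simp only [List.foldl_cons, h, Bool.true_eq_false, if_false, ih, List.all_cons,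
          Bool.true_or, Bool.true_and]
      · have hf : ps.getD p.1 true = false := by simpa using h
        simp only [List.foldl_cons, hf, if_true, ih, List.all_cons, Bool.false_or]
        rw [List.filter_filter]
        apply List.filter_congr
        intro c _
        simp [Bool.and_comm]

-- A's survival test over the concrete exclusions table equals B's reverse-table keep test.
lemma pv_pointwise (ps : PySem.Dict String Bool) (c : String) :
    pvExclusions.all (fun sc => ps.getD sc.1 true || c != sc.2) = pvKeep ps c := by
  rcases eq_or_ne c "price_signal_score" with h1 | h1
  · subst h1; simp [pvExclusions, pvKeep, pvFlagFor, PySem.Dict.get?]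
  rcases eq_or_ne c "fundamental_signal_score" with h2 | h2
  · subst h2; simp [pvExclusions, pvKeep, pvFlagFor, PySem.Dict.get?, List.find?]
  rcases eq_or_ne c "sentiment_signal_score" with h3 | h3
  · subst h3; simp [pvExclusions, pvKeep, pvFlagFor, PySem.Dict.get?, List.find?]
  rcases eq_or_ne c "macro_regime_score" with h4 | h4
  · subst h4; simp [pvExclusions, pvKeep, pvFlagFor, PySem.Dict.get?, List.find?]
  have b1 : ("price_signal_score" == c) = false := by simpa using (Ne.symm h1)
  have b2 : ("fundamental_signal_score" == c) = false := by simpa using (Ne.symm h2)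
  have b3 : ("sentiment_signal_score" == c) = false := by simpa using (Ne.symm h3)
  have b4 : ("macro_regime_score" == c) = false := by simpa using (Ne.symm h4)
  simp [pvExclusions, pvKeep, pvFlagFor, PySem.Dict.get?, List.find?, b1, b2, b3, b4, bne,
    h1, h2, h3, h4]

-- ===== VERDICT (by name: the statement is the Claim_ definition above) =====
theorem apply_fusion_feature_steps_py_spec : Claim_equal_apply_fusion_feature_steps_py := by
  intro feature_columns config _
  unfold Spec_apply_fusion_feature_steps_py
  unfold apply_fusion_feature_steps_py apply_fusion_feature_steps_py_alt
  have hstate :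
      PySem.Dict.mk (((PySem.Dict.mk config).get? "process_step_state").getD []) =
        (match (PySem.Dict.mk config).get? "process_step_state" with
          | some d => PySem.Dict.mk d
          | none => PySem.Dict.empty) := by
    cases (PySem.Dict.mk config).get? "process_step_state" <;> rfl
  rw [pv_loop_eq_filter, hstate]
  apply List.filter_congr
  intro c _
  exact pv_pointwise _ c
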